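-- pv_equiv track=rewrite | github.com/bdowdell/MIT_OCW_6.0001_Fall_2016_pset_solutions | ps3/ps3.py | update_hand
-- ===== SOURCE A (Python) =====
-- def update_hand(hand, word):
--     """
--     Does NOT assume that hand contains every letter in word at least as
--     many times as the letter appears in word. Letters in word that don't
--     appear in hand should be ignored. Letters that appear in word more times
--     than in hand should never result in a negative count; instead, set the
--     count in the returned hand to 0 (or remove the letter from the
--     dictionary, depending on how your code is structured).
--
--     Updates the hand: uses up the letters in the given word
--     and returns the new hand, without those letters in it.
--
--     Has no side effects: does not modify hand.
--
--     word: string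
--     hand: dictionary (string -> int)
--     returns: dictionary (string -> int)
--     """
--     # create a copy of the input hand
--     new_hand = hand.copy()
--     for c in word.lower():
--         try:
--             new_hand[c] -= 1
--             if new_hand[c] == 0:
--                 del(new_hand[c])
--         except:
--             pass
--
--     return new_hand
-- ===== SOURCE B (Python) =====
-- def update_hand(hand, word):
--     """
--     Uses up the letters in word from hand and returns the new hand,
--     without those letters in it; hand is not modified.
--     """
--     # multiplicity of each letter in the word
--     wc = {}
--     for c in word.lower():
--         wc[c] = wc.get(c, 0) + 1
--     # subtract each used letter in bulk; drop letters that are used up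
--     new_hand = dict(hand)
--     for c, n in wc.items():
--         if c in new_hand:
--             if new_hand[c] > n:
--                 new_hand[c] -= n
--             else:
--                 del new_hand[c]
--     return new_hand
-- ===== Notes on version B (the rewrite author's own statement) =====
-- stated objective: faster
-- what changed: B precomputes the word's letter multiplicities once and then subtracts each used letter from the hand in bulk (dropping used-up letters), instead of A's per-character decrement/delete with a try/except over a mutated copy.
-- intended difference: On hands whose stored count for some letter of the word is <= 0, A returns that letter with a negative count (its docstring promises counts are never negative); B removes the used-up letter, which is the documented intent. — e.g. on update_hand([("a", 0)], "a"): A returns [("a", -1)], B returns []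
import Mathlib
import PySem

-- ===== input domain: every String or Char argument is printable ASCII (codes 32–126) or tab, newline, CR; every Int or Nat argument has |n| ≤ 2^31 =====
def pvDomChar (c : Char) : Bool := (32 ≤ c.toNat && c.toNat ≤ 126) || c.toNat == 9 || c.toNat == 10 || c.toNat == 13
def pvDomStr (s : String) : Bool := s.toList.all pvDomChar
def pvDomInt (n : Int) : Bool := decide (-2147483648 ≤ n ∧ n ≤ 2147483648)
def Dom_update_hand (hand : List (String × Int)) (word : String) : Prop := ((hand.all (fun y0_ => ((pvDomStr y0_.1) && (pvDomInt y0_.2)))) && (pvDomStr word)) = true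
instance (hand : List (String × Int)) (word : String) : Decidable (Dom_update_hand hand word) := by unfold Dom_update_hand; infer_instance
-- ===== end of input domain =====

-- B precomputes the word's letter multiplicities once and subtracts each used letter in bulk;
-- A decrements a mutated copy per character. On stored counts ≤ 0 for a used letter their values differ (see D_).

-- ===== PORT A =====
-- literal port of A: copy the hand, then for each character of word.lower()
-- decrement its entry (KeyError → pass) and delete it when it reaches 0
def update_hand (hand : List (String × Int)) (word : String) : List (String × Int) :=
  (((PySem.Str.lower word).toList).foldl (fun (nh : PySem.Dict String Int) (c : Char) =>
      match PySem.Dict.get? nh (String.ofList [c]) with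
      | some v =>
        let nh' := PySem.Dict.insert nh (String.ofList [c]) (v - 1)
        if v - 1 = 0 then PySem.Dict.erase nh' (String.ofList [c]) else nh'
      | none => nh)
    (PySem.Dict.ofList hand)).items

-- ===== PORT B =====
-- port of Source B: wc = letter multiplicities of word.lower(); then one pass over wc.items()
-- subtracting in bulk from a copy of hand, deleting letters that are used up
def update_hand_alt (hand : List (String × Int)) (word : String) : List (String × Int) :=
  let wc := (((PySem.Str.lower word).toList).map (fun c => String.ofList [c])).foldl
      (fun d s => PySem.Dict.insert d s (PySem.Dict.getD d s 0 + 1)) (PySem.Dict.empty : PySem.Dict String Int)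
  (wc.items.foldl (fun (nh : PySem.Dict String Int) (p : String × Int) =>
      match PySem.Dict.get? nh p.1 with
      | some h => if p.2 < h then PySem.Dict.insert nh p.1 (h - p.2) else PySem.Dict.erase nh p.1
      | none => nh)
    (PySem.Dict.ofList hand)).items

-- ===== PRECONDITION & SPEC =====
-- On hands whose stored count for some letter of the word is ≤ 0, A returns that letter with a
-- negative count (its docstring promises counts are never negative); B removes the used-up letter,
-- which is the documented intent.
def D_update_hand (hand : List (String × Int)) (word : String) : Prop :=
  ∃ p ∈ (PySem.Dict.ofList hand).items,
    p.2 ≤ 0 ∧ p.1 ∈ ((PySem.Str.lower word).toList.map (fun c => String.ofList [c]))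
instance (hand : List (String × Int)) (word : String) : Decidable (D_update_hand hand word) := by
  unfold D_update_hand; infer_instance

def Spec_update_hand (hand : List (String × Int)) (word : String) (out : List (String × Int)) : Prop :=
  ¬ D_update_hand hand word → out = update_hand_alt hand word
instance (hand : List (String × Int)) (word : String) (out : List (String × Int)) : Decidable (Spec_update_hand hand word out) := by unfold Spec_update_hand; infer_instance

def pvDiffWitness_update_hand : (List (String × Int)) × String := ([("a", 0)], "a")
def pvDiffWitnessOut_update_hand : (List (String × Int)) × (List (String × Int)) := ([("a", -1)], [])

-- ===== CLAIM (what is proved, stated in full; the proofs are below) =====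
def Claim_unchanged_update_hand : Prop := ∀ (hand : List (String × Int)) (word : String), Dom_update_hand hand word → Spec_update_hand hand word (update_hand hand word)
def Claim_changed_update_hand : Prop := Dom_update_hand (pvDiffWitness_update_hand.1) (pvDiffWitness_update_hand.2) ∧ D_update_hand (pvDiffWitness_update_hand.1) (pvDiffWitness_update_hand.2) ∧ update_hand (pvDiffWitness_update_hand.1) (pvDiffWitness_update_hand.2) = pvDiffWitnessOut_update_hand.1 ∧ update_hand_alt (pvDiffWitness_update_hand.1) (pvDiffWitness_update_hand.2) = pvDiffWitnessOut_update_hand.2 ∧ pvDiffWitnessOut_update_hand.1 ≠ pvDiffWitnessOut_update_hand.2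
def Claim_exact_update_hand : Prop := ∀ (hand : List (String × Int)) (word : String), Dom_update_hand hand word → D_update_hand hand word → update_hand hand word ≠ update_hand_alt hand word

-- ===== LEMMAS AND PROOFS =====

-- proof-only helpers
def pvSing (c : Char) : String := String.ofList [c]

-- per-entry effect of A's whole loop on one hand entry
def pvF (L : List Char) (p : String × Int) : Option (String × Int) :=
  if 0 < p.2 ∧ p.2 ≤ (((L.map pvSing).count p.1 : Nat) : Int) then none
  else some (p.1, p.2 - (((L.map pvSing).count p.1 : Nat) : Int))

-- per-entry effect of B's loop, parametrised by the (assoc-list view of) wc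
def pvG (wl : List (String × Int)) (p : String × Int) : Option (String × Int) :=
  match wl.find? (fun q => q.1 == p.1) with
  | none => some p
  | some q => if q.2 < p.2 then some (p.1, p.2 - q.2) else none

-- per-entry effect of one iteration of B's loop (letter k used n times)
def pvH (k : String) (n : Int) (p : String × Int) : Option (String × Int) :=
  if p.1 = k then (if n < p.2 then some (p.1, p.2 - n) else none) else some p

lemma pvG_fst (wl : List (String × Int)) (p q : String × Int) (h : pvG wl p = some q) : q.1 = p.1 := by
  unfold pvG at h
  split at h
  · cases h; rfl
  · split at h
    · cases h; rfl
    · exact absurd h (by simp)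

lemma pvStep_nodup (d : PySem.Dict String Int) (c : Char) (hnd : d.keys.Nodup) :
    ((match PySem.Dict.get? d (String.ofList [c]) with
      | some v =>
        let nh' := PySem.Dict.insert d (String.ofList [c]) (v - 1)
        if v - 1 = 0 then PySem.Dict.erase nh' (String.ofList [c]) else nh'
      | none => d) : PySem.Dict String Int).keys.Nodup := by
  cases hg : PySem.Dict.get? d (String.ofList [c]) with
  | none => simpa [hg] using hnd
  | some v =>
    have hins := PySem.Dict.nodup_keys_insert d (String.ofList [c]) (v - 1) hnd
    show (if v - 1 = 0
      then PySem.Dict.erase (PySem.Dict.insert d (String.ofList [c]) (v - 1)) (String.ofList [c])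
      else PySem.Dict.insert d (String.ofList [c]) (v - 1)).keys.Nodup
    by_cases hv : v - 1 = 0
    · rw [if_pos hv]
      refine List.Nodup.sublist ?_ hins
      show (List.map Prod.fst (List.filter _
        (d.insert (String.ofList [c]) (v - 1)).items)).Sublist
        (List.map Prod.fst (d.insert (String.ofList [c]) (v - 1)).items)
      exact List.Sublist.map Prod.fst List.filter_sublist
    · rw [if_neg hv]
      exact hins

-- A's loop, characterised entry-by-entry
lemma pvMain (L : List Char) (d : PySem.Dict String Int) (hnd : d.keys.Nodup) :
    (L.foldl (fun (nh : PySem.Dict String Int) (c : Char) =>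
      match PySem.Dict.get? nh (String.ofList [c]) with
      | some v =>
        let nh' := PySem.Dict.insert nh (String.ofList [c]) (v - 1)
        if v - 1 = 0 then PySem.Dict.erase nh' (String.ofList [c]) else nh'
      | none => nh) d).items = d.items.filterMap (pvF L) := by
  induction L generalizing d with
  | nil =>
    rw [List.foldl_nil,
      List.filterMap_congr (g := some) (by
        intro p hp
        unfold pvF
        rw [if_neg (fun hh => by
          have h2 := hh.2
          simp only [List.map_nil, List.count_nil, Nat.cast_zero] at h2
          omega)]
        simp)]
    simp
  | cons c L ih =>
    rw [List.foldl_cons]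
    have hstep := ih _ (pvStep_nodup d c hnd)
    rw [hstep]
    cases hg : PySem.Dict.get? d (String.ofList [c]) with
    | none =>
      refine (List.filterMap_congr ?_).symm
      intro p hp
      have hne : p.1 ≠ String.ofList [c] := by
        intro he
        have := PySem.Dict.get?_of_mem_items d (k := p.1) (v := p.2) (by simpa using hp) hnd
        rw [he, hg] at this; exact absurd this (by simp)
      have hc : (pvSing c == p.1) = false := by
        simp only [pvSing, beq_eq_false_iff_ne]; exact fun h => hne h.symm
      unfold pvF
      simp only [List.map_cons, List.count_cons, hc]
      simp
    | some v =>
      have hcont : d.contains (String.ofList [c]) = true := by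
        rw [PySem.Dict.contains_eq_isSome_get?, hg]; rfl
      have hitems := PySem.Dict.items_insert_of_contains d (k := String.ofList [c]) (v - 1) hcont
      by_cases hv : v - 1 = 0
      · -- the count reaches 0: the entry is deleted
        rw [show (match some v with
            | some v =>
              let nh' := PySem.Dict.insert d (String.ofList [c]) (v - 1)
              if v - 1 = 0 then PySem.Dict.erase nh' (String.ofList [c]) else nh'
            | none => d)
            = PySem.Dict.erase (PySem.Dict.insert d (String.ofList [c]) (v - 1)) (String.ofList [c]) from by
          simp only []; rw [if_pos hv]]
        show (List.filterMap (pvF L) (List.filter _ (d.insert (String.ofList [c]) (v - 1)).items)) = _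
        rw [hitems, List.filter_map]
        rw [List.filter_congr (q := fun p : String × Int => !(p.1 == String.ofList [c])) (by
          intro p hp
          by_cases hpe : p.1 = String.ofList [c] <;> simp [hpe])]
        rw [List.map_congr_left (g := id) (by
          intro p hp
          have := List.of_mem_filter hp
          simp only [Bool.not_eq_true', beq_eq_false_iff_ne] at this
          simp [this]), List.map_id]
        rw [List.filterMap_filter]
        refine (List.filterMap_congr ?_).symm
        intro p hp
        by_cases hpe : p.1 = String.ofList [c]
        · have hpv : PySem.Dict.get? d p.1 = some p.2 :=
            PySem.Dict.get?_of_mem_items d (by simpa using hp) hnd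
          rw [hpe, hg] at hpv
          have hp2 : p.2 = v := by cases hpv; rfl
          have hc : (pvSing c == p.1) = true := by simp [pvSing, hpe]
          unfold pvF
          rw [if_pos (by
            simp only [List.map_cons, List.count_cons, hc, if_true, hp2]
            push_cast
            omega)]
          simp [hpe]
        · have hc : (pvSing c == p.1) = false := by
            simp only [pvSing, beq_eq_false_iff_ne]; exact fun h => hpe h.symm
          unfold pvF
          simp only [List.map_cons, List.count_cons, hc]
          simp [hpe]
      · -- the count stays nonzero: the entry is overwritten
        rw [show (match some v with
            | some v =>
              let nh' := PySem.Dict.insert d (String.ofList [c]) (v - 1)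
              if v - 1 = 0 then PySem.Dict.erase nh' (String.ofList [c]) else nh'
            | none => d)
            = PySem.Dict.insert d (String.ofList [c]) (v - 1) from by
          simp only []; rw [if_neg hv]]
        rw [hitems, List.filterMap_map]
        refine (List.filterMap_congr ?_).symm
        intro p hp
        by_cases hpe : p.1 = String.ofList [c]
        · have hpv : PySem.Dict.get? d p.1 = some p.2 :=
            PySem.Dict.get?_of_mem_items d (by simpa using hp) hnd
          rw [hpe, hg] at hpv
          have hp2 : p.2 = v := by cases hpv; rfl
          have hb : (p.1 == String.ofList [c]) = true := by simp [hpe]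
          have hc : (pvSing c == p.1) = true := by simp [pvSing, hpe]
          unfold pvF
          simp only [Function.comp_apply, hb, if_true, List.map_cons, List.count_cons, hc, hp2]
          rw [← hpe]
          push_cast
          split_ifs with h1 h2 h3 <;> first
            | rfl
            | (exfalso; omega)
            | (simp only [Option.some.injEq, Prod.mk.injEq, true_and]; omega)
        · have hb : (p.1 == String.ofList [c]) = false := by simp [hpe]
          have hc : (pvSing c == p.1) = false := by
            simp only [pvSing, beq_eq_false_iff_ne]; exact fun h => hpe h.symm
          unfold pvF
          simp only [Function.comp_apply, hb, List.map_cons, List.count_cons, hc]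
          simp [hpe]

-- one iteration of B's loop, entry-by-entry
lemma pvStepB (d : PySem.Dict String Int) (k : String) (n : Int) (hnd : d.keys.Nodup) :
    ((match PySem.Dict.get? d k with
      | some h => if n < h then PySem.Dict.insert d k (h - n) else PySem.Dict.erase d k
      | none => d) : PySem.Dict String Int).items = d.items.filterMap (pvH k n) := by
  cases hg : PySem.Dict.get? d k with
  | none =>
    show d.items = _
    refine ((List.filterMap_congr (g := some) ?_).trans List.filterMap_some).symm
    intro p hp
    have hne : p.1 ≠ k := by
      intro he
      have := PySem.Dict.get?_of_mem_items d (k := p.1) (v := p.2) hp hnd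
      rw [he, hg] at this; exact absurd this (by simp)
    simp [pvH, hne]
  | some h =>
    have hcont : d.contains k = true := by
      rw [PySem.Dict.contains_eq_isSome_get?, hg]; rfl
    rw [show (match some h with
        | some h => if n < h then PySem.Dict.insert d k (h - n) else PySem.Dict.erase d k
        | none => d) = if n < h then PySem.Dict.insert d k (h - n) else PySem.Dict.erase d k from rfl]
    by_cases hn : n < h
    · rw [if_pos hn]
      rw [PySem.Dict.items_insert_of_contains d (h - n) hcont]
      rw [← List.filterMap_eq_map (f := fun p : String × Int => if p.1 == k then (k, h - n) else p)]
      refine List.filterMap_congr ?_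
      intro p hp
      by_cases hpe : p.1 = k
      · have hpv := PySem.Dict.get?_of_mem_items d (k := p.1) (v := p.2) hp hnd
        rw [hpe, hg] at hpv
        have hp2 : p.2 = h := by cases hpv; rfl
        simp [pvH, hpe, hp2, hn]
      · simp [pvH, hpe]
    · rw [if_neg hn]
      show List.filter _ d.items = _
      rw [← List.filterMap_eq_filter]
      refine List.filterMap_congr ?_
      intro p hp
      by_cases hpe : p.1 = k
      · have hpv := PySem.Dict.get?_of_mem_items d (k := p.1) (v := p.2) hp hnd
        rw [hpe, hg] at hpv
        have hp2 : p.2 = h := by cases hpv; rfl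
        simp [pvH, Option.guard, hpe, hp2, hn]
      · simp [pvH, Option.guard, hpe]

-- B's whole loop, entry-by-entry (wl = wc.items, distinct keys)
lemma pvMainB (wl : List (String × Int)) (d : PySem.Dict String Int)
    (hwl : (wl.map Prod.fst).Nodup) (hnd : d.keys.Nodup) :
    (wl.foldl (fun (nh : PySem.Dict String Int) (p : String × Int) =>
      match PySem.Dict.get? nh p.1 with
      | some h => if p.2 < h then PySem.Dict.insert nh p.1 (h - p.2) else PySem.Dict.erase nh p.1
      | none => nh) d).items = d.items.filterMap (pvG wl) := by
  induction wl generalizing d with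
  | nil =>
    rw [List.foldl_nil]
    refine ((List.filterMap_congr (g := some) ?_).trans List.filterMap_some).symm
    intro p hp
    simp [pvG]
  | cons q wl ih =>
    rw [List.foldl_cons]
    have hwl' : (q.1 :: wl.map Prod.fst).Nodup := by simpa using hwl
    have hq : q.1 ∉ wl.map Prod.fst := (List.nodup_cons.mp hwl').1
    have hstep := pvStepB d q.1 q.2 hnd
    have hnd' : ((match PySem.Dict.get? d q.1 with
        | some h => if q.2 < h then PySem.Dict.insert d q.1 (h - q.2) else PySem.Dict.erase d q.1
        | none => d) : PySem.Dict String Int).keys.Nodup := by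
      cases hg : PySem.Dict.get? d q.1 with
      | none => simpa [hg] using hnd
      | some h =>
        by_cases hn : q.2 < h
        · simpa [hg, hn] using PySem.Dict.nodup_keys_insert d q.1 (h - q.2) hnd
        · show (if q.2 < h then PySem.Dict.insert d q.1 (h - q.2) else PySem.Dict.erase d q.1).keys.Nodup
          rw [if_neg hn]
          refine List.Nodup.sublist ?_ hnd
          show (List.map Prod.fst (List.filter _ d.items)).Sublist (List.map Prod.fst d.items)
          exact List.Sublist.map Prod.fst List.filter_sublist
    rw [ih _ (List.nodup_cons.mp hwl').2 hnd', hstep,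
      List.filterMap_filterMap]
    refine List.filterMap_congr ?_
    intro p hp
    by_cases hpe : p.1 = q.1
    · have hfind : wl.find? (fun r => r.1 == p.1) = none := by
        rw [List.find?_eq_none]
        intro r hr
        simp only [beq_iff_eq]
        intro he
        exact hq (by rw [hpe] at he; exact he ▸ List.mem_map_of_mem hr)
      rw [hpe] at hfind
      simp only [pvH, hpe, if_pos rfl]
      by_cases hn : q.2 < p.2
      · simp only [if_pos hn, Option.bind_some]
        simp [pvG, List.find?_cons, hpe, hfind, hn]
      · simp only [if_neg hn, Option.bind_none]
        simp [pvG, List.find?_cons, hpe, hn]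
    · have hb : (q.1 == p.1) = false := by
        simp only [beq_eq_false_iff_ne]; exact fun h => hpe h.symm
      simp only [pvH, if_neg hpe, Option.bind_some]
      simp [pvG, List.find?_cons, hb]

lemma pvFind_self (l : List String) (x : String) (h : x ∈ l) :
    l.find? (fun k => k == x) = some x := by
  induction l with
  | nil => cases h
  | cons a l ih =>
    by_cases ha : a = x
    · simp [List.find?_cons, ha]
    · have hb : (a == x) = false := by simpa using ha
      rcases List.mem_cons.mp h with h1 | h2
      · exact absurd h1.symm ha
      · simp [List.find?_cons, hb, ih h2]

-- pvG applied to the counter's items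
lemma pvG_counter (S : List String) (p : String × Int) :
    pvG ((PySem.Set.ofList S).map (fun k => (k, (S.count k : Int)))) p
      = if p.1 ∈ S then
          (if (S.count p.1 : Int) < p.2 then some (p.1, p.2 - (S.count p.1 : Int)) else none)
        else some p := by
  unfold pvG
  rw [List.find?_map]
  by_cases h : p.1 ∈ S
  · rw [show (List.find? ((fun q : String × Int => q.1 == p.1) ∘ fun k => (k, (S.count k : Int)))
        (PySem.Set.ofList S)) = some p.1 from by
      rw [show ((fun q : String × Int => q.1 == p.1) ∘ fun k => (k, (S.count k : Int)))
          = fun k => k == p.1 from rfl]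
      exact pvFind_self _ _ ((PySem.Set.mem_ofList _ _).mpr h)]
    simp [h]
  · rw [show (List.find? ((fun q : String × Int => q.1 == p.1) ∘ fun k => (k, (S.count k : Int)))
        (PySem.Set.ofList S)) = none from by
      rw [List.find?_eq_none]
      intro k hk
      simp only [Function.comp_apply, beq_iff_eq]
      exact fun he => h (he ▸ (PySem.Set.mem_ofList _ _).mp hk)]
    simp [h]

-- B unfolded to the entry-by-entry form
lemma pvAlt_eq (hand : List (String × Int)) (word : String) :
    update_hand_alt hand word
      = (PySem.Dict.ofList hand).items.filterMap
          (pvG (((PySem.Set.ofList ((PySem.Str.lower word).toList.map pvSing)).map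
            (fun k => (k, (((PySem.Str.lower word).toList.map pvSing).count k : Int)))))) := by
  unfold update_hand_alt
  rw [show (((PySem.Str.lower word).toList).map (fun c => String.ofList [c]))
      = ((PySem.Str.lower word).toList).map pvSing from rfl]
  rw [PySem.Dict.foldl_insert_getD_add_one_eq_counter]
  show (List.foldl (fun (nh : PySem.Dict String Int) (p : String × Int) =>
      match PySem.Dict.get? nh p.1 with
      | some h => if p.2 < h then PySem.Dict.insert nh p.1 (h - p.2) else PySem.Dict.erase nh p.1
      | none => nh)
    (PySem.Dict.ofList hand)
    (PySem.Dict.counter ((PySem.Str.lower word).toList.map pvSing)).items).items = _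
  rw [PySem.Dict.items_counter]
  exact pvMainB _ _ (by
    rw [List.map_map, show (Prod.fst ∘ fun k => (k, ((((PySem.Str.lower word).toList.map pvSing).count k : Nat) : Int))) = id from rfl,
      List.map_id]
    exact PySem.Set.nodup_ofList _) (PySem.Dict.nodup_keys_ofList hand)

-- ===== VERDICT (by name: the statement is the Claim_ definition above) =====
theorem update_hand_spec : Claim_unchanged_update_hand := by
  intro hand word _ hD
  unfold update_hand
  rw [pvMain _ _ (PySem.Dict.nodup_keys_ofList hand), pvAlt_eq]
  refine List.filterMap_congr ?_
  intro p hp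
  rw [pvG_counter]
  have hnotD : ¬ (p.2 ≤ 0 ∧ p.1 ∈ ((PySem.Str.lower word).toList.map pvSing)) := by
    intro hc
    exact hD ⟨p, hp, hc.1, hc.2⟩
  by_cases hm : p.1 ∈ ((PySem.Str.lower word).toList.map pvSing)
  · have hpos : 0 < p.2 := by
      by_contra hle
      exact hnotD ⟨by omega, hm⟩
    rw [if_pos hm]
    unfold pvF
    rcases lt_or_ge ((((PySem.Str.lower word).toList.map pvSing).count p.1 : Nat) : Int) p.2 with hlt | hge
    · rw [if_neg (by omega), if_pos hlt]
    · rw [if_pos ⟨hpos, by omega⟩, if_neg (by omega)]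
  · have hc0 : ((PySem.Str.lower word).toList.map pvSing).count p.1 = 0 :=
      List.count_eq_zero.mpr hm
    rw [if_neg hm]
    unfold pvF
    rw [hc0]
    rw [if_neg (by push_cast; omega)]
    simp

theorem update_hand_changed : Claim_changed_update_hand := by
  unfold Claim_changed_update_hand; decide

theorem update_hand_tight : Claim_exact_update_hand := by
  intro hand word _ hD heq
  obtain ⟨p0, hp0, hle, hmem⟩ := hD
  have hnd := PySem.Dict.nodup_keys_ofList hand
  -- A's output contains key p0.1
  have hA : p0.1 ∈ (update_hand hand word).map Prod.fst := by
    unfold update_hand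
    rw [pvMain _ _ hnd]
    have hsome : pvF ((PySem.Str.lower word).toList) p0
        = some (p0.1, p0.2 - ((((PySem.Str.lower word).toList.map pvSing).count p0.1 : Nat) : Int)) := by
      unfold pvF
      rw [if_neg (by intro hh; omega)]
    have hmemA : (p0.1, p0.2 - ((((PySem.Str.lower word).toList.map pvSing).count p0.1 : Nat) : Int))
        ∈ (PySem.Dict.ofList hand).items.filterMap (pvF ((PySem.Str.lower word).toList)) :=
      List.mem_filterMap.mpr ⟨p0, hp0, hsome⟩
    exact List.mem_map.mpr ⟨_, hmemA, rfl⟩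
  -- B's output does not
  have hB : p0.1 ∉ (update_hand_alt hand word).map Prod.fst := by
    rw [pvAlt_eq]
    intro hmm
    obtain ⟨q, hqmem, hq1⟩ := List.mem_map.mp hmm
    obtain ⟨p, hpmem, hpq⟩ := List.mem_filterMap.mp hqmem
    have hfst := pvG_fst _ _ _ hpq
    have hpp0 : p = p0 := by
      have h1 := PySem.Dict.get?_of_mem_items _ (k := p.1) (v := p.2) hpmem hnd
      have h2 := PySem.Dict.get?_of_mem_items _ (k := p0.1) (v := p0.2) hp0 hnd
      have hk : p.1 = p0.1 := by rw [hfst] at hq1; exact hq1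
      rw [hk, h2] at h1
      exact Prod.ext hk (Option.some.inj h1).symm
    rw [hpp0, pvG_counter] at hpq
    have hcnt : 1 ≤ (((PySem.Str.lower word).toList.map pvSing).count p0.1 : Nat) :=
      List.one_le_count_iff.mpr (by simpa [pvSing] using hmem)
    rw [if_pos (by simpa [pvSing] using hmem), if_neg (by push_cast; omega)] at hpq
    exact absurd hpq (by simp)
  rw [heq] at hA
  exact hB hA
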